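-- pv_equiv track=rewrite | github.com/skmtrd/INIAD-study | exam2/5.py | abbrev
-- ===== SOURCE A (Python) =====
-- def abbrev(s):
--     pre_marker = []
--     markers = []
--     for index, i in enumerate(s):
--         if i == "{" and len(pre_marker) == 0:
--             pre_marker.append(index)
--         if i == "}" and len(pre_marker) == 1:
--             pre_marker.append(index)
--             markers.append(pre_marker)
--             pre_marker = []
--
--
--     remove_index = []
--
--     for marker in markers:
--         for i in range(marker[0], marker[1] + 1):
--             remove_index.append(i)
--
--     result = ""
--     for index, i in enumerate(s):
--         if index in remove_index:
--             continue
--         result += i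
--     return result
-- ===== SOURCE B (Python) =====
-- def abbrev(s):
--     out = []
--     buf = None  # None = outside braces; else chars seen since the opening '{' (exclusive)
--     for ch in s:
--         if buf is None:
--             if ch == "{":
--                 buf = []
--             else:
--                 out.append(ch)
--         elif ch == "}":
--             buf = None
--         else:
--             buf.append(ch)
--     if buf is not None:
--         out.append("{")
--         out.extend(buf)
--     return "".join(out)
-- ===== Notes on version B (the rewrite author's own statement) =====
-- stated objective: faster
-- what changed: Replaced the three-pass marker/remove_index/filter algorithm (whose 'index in remove_index' list-membership test makes it quadratic) with a one-pass state machine that buffers characters after an unmatched '{' and drops the buffer on '}'.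
import Mathlib
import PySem

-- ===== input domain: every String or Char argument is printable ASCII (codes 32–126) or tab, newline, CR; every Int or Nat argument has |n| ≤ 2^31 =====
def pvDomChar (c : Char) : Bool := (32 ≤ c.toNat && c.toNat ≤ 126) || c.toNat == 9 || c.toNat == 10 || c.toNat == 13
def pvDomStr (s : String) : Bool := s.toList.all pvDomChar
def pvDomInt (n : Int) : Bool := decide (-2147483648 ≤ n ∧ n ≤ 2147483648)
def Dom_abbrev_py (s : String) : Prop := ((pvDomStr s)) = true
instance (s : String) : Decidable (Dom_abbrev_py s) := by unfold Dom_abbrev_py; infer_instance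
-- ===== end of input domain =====

-- B replaces A's three passes (collect {..} markers, build a remove_index list, filter by
-- quadratic membership test) with a single linear pass that buffers after '{' and drops on '}'.

-- ===== PORT A =====
-- first loop: state (pre_marker, markers)
def aStep1 (st : List Int × List (List Int)) (p : Int × Char) : List Int × List (List Int) :=
  let pre := if p.2 = '{' ∧ st.1.length = 0 then st.1 ++ [p.1] else st.1
  if p.2 = '}' ∧ pre.length = 1 then ([], st.2 ++ [pre ++ [p.1]]) else (pre, st.2)

def abbrev_py (s : String) : String :=
  let markers := ((PySem.List.enumerate s.toList 0).foldl aStep1 ([], [])).2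
  -- marker[0] / marker[1]: every marker has exactly two entries, so pyGetD is exact here
  let removeIndex := markers.foldl
    (fun acc marker =>
      (PySem.List.pyRange (PySem.List.pyGetD marker 0 0) (PySem.List.pyGetD marker 1 0 + 1) 1).foldl
        (fun acc2 i => acc2 ++ [i]) acc) []
  let result := (PySem.List.enumerate s.toList 0).foldl
    (fun result p => if p.1 ∈ removeIndex then result else result ++ [p.2]) []
  String.ofList result

-- ===== PORT B =====
def bStep (st : List Char × Option (List Char)) (ch : Char) : List Char × Option (List Char) :=
  match st.2 with
  | none => if ch = '{' then (st.1, some []) else (st.1 ++ [ch], none)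
  | some buf => if ch = '}' then (st.1, none) else (st.1, some (buf ++ [ch]))

def abbrev_py_alt (s : String) : String :=
  let st := s.toList.foldl bStep ([], none)
  match st.2 with
  | none => String.ofList st.1
  | some buf => String.ofList (st.1 ++ '{' :: buf)

-- ===== PRECONDITION & SPEC =====
def Spec_abbrev_py (s : String) (out : String) : Prop := out = abbrev_py_alt s
instance (s : String) (out : String) : Decidable (Spec_abbrev_py s out) := by unfold Spec_abbrev_py; infer_instance

-- ===== CLAIM (what is proved, stated in full; the proofs are below) =====
def Claim_equal_abbrev_py : Prop := ∀ (s : String), Dom_abbrev_py s → Spec_abbrev_py s (abbrev_py s)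

-- ===== LEMMAS AND PROOFS =====

-- the common single-pass specification: specOut = outside braces, specIn buf = inside (buf since '{')
mutual
def specOut : List Char → List Char
  | [] => []
  | c :: r => if c = '{' then specIn [] r else c :: specOut r
def specIn : List Char → List Char → List Char
  | buf, [] => '{' :: buf
  | buf, c :: r => if c = '}' then specOut r else specIn (buf ++ [c]) r
end

-- A's marker pairs, recursively
mutual
def mkOut : Int → List Char → List (Int × Int)
  | _, [] => []
  | i, c :: r => if c = '{' then mkIn i (i + 1) r else mkOut (i + 1) r
def mkIn : Int → Int → List Char → List (Int × Int)
  | _, _, [] => []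
  | a, i, c :: r => if c = '}' then (a, i) :: mkOut (i + 1) r else mkIn a (i + 1) r
end

def remIdx (ms : List (Int × Int)) : List Int :=
  ms.flatMap (fun p => PySem.List.pyRange p.1 (p.2 + 1) 1)

-- A's third loop, recursively
def filterF (Rm : List Int) : Int → List Char → List Char
  | _, [] => []
  | i, c :: r => if i ∈ Rm then filterF Rm (i + 1) r else c :: filterF Rm (i + 1) r

-- ---- phase 1 of A produces exactly the mkOut/mkIn markers ----
lemma phase1 (l : List Char) : ∀ (i : Int) (M : List (List Int)),
    (((PySem.List.enumerate l i).foldl aStep1 ([], M)).2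
        = M ++ (mkOut i l).map (fun p => [p.1, p.2]))
  ∧ (∀ a : Int, ((PySem.List.enumerate l i).foldl aStep1 ([a], M)).2
        = M ++ (mkIn a i l).map (fun p => [p.1, p.2])) := by
  induction l with
  | nil => intro i M; simp [PySem.List.enumerate_nil, mkOut, mkIn]
  | cons c r ih =>
    intro i M
    constructor
    · rw [PySem.List.enumerate_cons, List.foldl_cons]
      by_cases hc : c = '{'
      · have : aStep1 ([], M) (i, c) = ([i], M) := by
          simp [aStep1, hc]
        rw [this, (ih (i+1) M).2 i]
        simp [mkOut, hc]
      · have : aStep1 ([], M) (i, c) = ([], M) := by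
          simp [aStep1, hc]
        rw [this, (ih (i+1) M).1]
        simp [mkOut, hc]
    · intro a
      rw [PySem.List.enumerate_cons, List.foldl_cons]
      by_cases hc : c = '}'
      · have : aStep1 ([a], M) (i, c) = ([], M ++ [[a, i]]) := by
          simp [aStep1, hc]
        rw [this, (ih (i+1) (M ++ [[a,i]])).1]
        simp [mkIn, hc]
      · have : aStep1 ([a], M) (i, c) = ([a], M) := by
          simp [aStep1, hc]
        rw [this, (ih (i+1) M).2 a]
        simp [mkIn, hc]

-- ---- phase 3 of A is filterF ----
lemma phase3 (Rm : List Int) (l : List Char) : ∀ (i : Int) (res : List Char),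
    (PySem.List.enumerate l i).foldl
        (fun result p => if p.1 ∈ Rm then result else result ++ [p.2]) res
      = res ++ filterF Rm i l := by
  induction l with
  | nil => intro i res; simp [PySem.List.enumerate_nil, filterF]
  | cons c r ih =>
    intro i res
    rw [PySem.List.enumerate_cons, List.foldl_cons]
    by_cases h : i ∈ Rm <;> simp [h, filterF, ih]

-- ---- helper facts about markers ----
lemma mkIn_no_close (r : List Char) : ∀ (a i : Int), '}' ∉ r → mkIn a i r = [] := by
  induction r with
  | nil => intro a i _; simp [mkIn]
  | cons c r ih =>
    intro a i h
    simp only [List.mem_cons, not_or] at h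
    have hc : ¬ (c = '}') := fun hh => h.1 hh.symm
    rw [mkIn, if_neg hc, ih a (i+1) h.2]

lemma mkIn_close (u : List Char) : ∀ (v : List Char) (a i : Int), '}' ∉ u →
    mkIn a i (u ++ '}' :: v) = (a, i + u.length) :: mkOut (i + u.length + 1) v := by
  induction u with
  | nil => intro v a i _; simp [mkIn]
  | cons c u ih =>
    intro v a i h
    simp only [List.mem_cons, not_or] at h
    have hc : ¬ (c = '}') := fun hh => h.1 hh.symm
    simp only [List.cons_append, mkIn, if_neg hc]
    rw [ih v a (i+1) h.2]
    simp only [List.length_cons]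
    push_cast
    ring_nf

lemma specIn_no_close (r : List Char) : ∀ buf, '}' ∉ r → specIn buf r = '{' :: (buf ++ r) := by
  induction r with
  | nil => intro buf _; simp [specIn]
  | cons c r ih =>
    intro buf h
    simp only [List.mem_cons, not_or] at h
    have hc : ¬ (c = '}') := fun hh => h.1 hh.symm
    simp [specIn, hc, ih (buf ++ [c]) h.2]

lemma specIn_close (u : List Char) : ∀ (v : List Char) (buf), '}' ∉ u →
    specIn buf (u ++ '}' :: v) = specOut v := by
  induction u with
  | nil => intro v buf _; simp [specIn]
  | cons c u ih =>
    intro v buf h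
    simp only [List.mem_cons, not_or] at h
    have hc : ¬ (c = '}') := fun hh => h.1 hh.symm
    simp [specIn, hc, ih v (buf ++ [c]) h.2]

lemma first_split (l : List Char) (h : '}' ∈ l) :
    ∃ u v, l = u ++ '}' :: v ∧ '}' ∉ u := by
  induction l with
  | nil => cases h
  | cons c r ih =>
    by_cases hc : c = '}'
    · exact ⟨[], r, by simp [hc], by simp⟩
    · have : '}' ∈ r := by
        rcases List.mem_cons.mp h with h1 | h1
        · exact absurd h1.symm hc
        · exact h1
      obtain ⟨u, v, rfl, hu⟩ := ih this
      exact ⟨c :: u, v, rfl, by simp [hu]; intro hh; exact hc hh.symm⟩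

-- lower bound on removed indices
lemma remIdx_lb : ∀ (n : Nat) (l : List Char), l.length ≤ n →
    (∀ (i x : Int), x ∈ remIdx (mkOut i l) → i ≤ x) := by
  intro n
  induction n with
  | zero =>
    intro l hl i x hx
    have : l = [] := List.length_eq_zero_iff.mp (Nat.le_zero.mp hl)
    subst this; simp [mkOut, remIdx] at hx
  | succ n ih =>
    intro l hl i x hx
    match l with
    | [] => simp [mkOut, remIdx] at hx
    | c :: r =>
      by_cases hc : c = '{'
      · rw [mkOut, if_pos hc] at hx
        by_cases hr : '}' ∈ r
        · obtain ⟨u, v, rfl, hu⟩ := first_split r hr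
          rw [mkIn_close u v i (i+1) hu] at hx
          simp only [remIdx, List.flatMap_cons, List.mem_append] at hx
          rcases hx with hx | hx
          · exact (PySem.List.mem_pyRange_one.mp hx).1
          · have := ih v (by simp at hl ⊢; omega) (i + 1 + u.length + 1) x hx
            omega
        · rw [mkIn_no_close r (i) (i+1) hr] at hx; simp [remIdx] at hx
      · rw [mkOut, if_neg hc] at hx
        have := ih r (by simp at hl; omega) (i+1) x hx
        omega

-- filterF keeps everything when nothing ≥ i is removed
lemma filterF_keep (l : List Char) : ∀ (i : Int) (Rm : List Int),
    (∀ x : Int, i ≤ x → x ∉ Rm) → filterF Rm i l = l := by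
  induction l with
  | nil => intro i Rm _; simp [filterF]
  | cons c r ih =>
    intro i Rm h
    rw [filterF, if_neg (h i le_rfl)]
    rw [ih (i+1) Rm (fun x hx => h x (by omega))]

-- filterF drops a fully-removed block
lemma filterF_drop (w : List Char) : ∀ (v : List Char) (i : Int) (Rm : List Int),
    (∀ x : Int, i ≤ x → x < i + w.length → x ∈ Rm) →
    filterF Rm i (w ++ v) = filterF Rm (i + w.length) v := by
  induction w with
  | nil => intro v i Rm _; simp
  | cons c w ih =>
    intro v i Rm h
    have hi : i ∈ Rm := h i le_rfl (by simp only [List.length_cons]; push_cast; omega)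
    rw [List.cons_append, filterF, if_pos hi]
    rw [ih v (i+1) Rm (fun x hx1 hx2 => h x (by omega) (by simp only [List.length_cons] at *; push_cast at *; omega))]
    congr 1
    simp only [List.length_cons]
    push_cast
    ring

-- ---- the main correspondence ----
lemma main_out : ∀ (n : Nat) (l : List Char), l.length ≤ n →
    ∀ (i : Int) (Rm : List Int),
      (∀ x : Int, i ≤ x → (x ∈ Rm ↔ x ∈ remIdx (mkOut i l))) →
      filterF Rm i l = specOut l := by
  intro n
  induction n with
  | zero =>
    intro l hl i Rm _
    have : l = [] := List.length_eq_zero_iff.mp (Nat.le_zero.mp hl)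
    subst this; simp [filterF, specOut]
  | succ n ih =>
    intro l hl i Rm H
    match l with
    | [] => simp [filterF, specOut]
    | c :: r =>
      by_cases hc : c = '{'
      · subst hc
        by_cases hr : '}' ∈ r
        · obtain ⟨u, v, rfl, hu⟩ := first_split r hr
          have hmk : mkOut i ('{' :: (u ++ '}' :: v))
              = (i, i + 1 + u.length) :: mkOut (i + 1 + u.length + 1) v := by
            rw [mkOut, if_pos rfl, mkIn_close u v i (i+1) hu]
          have hrem : remIdx (mkOut i ('{' :: (u ++ '}' :: v)))
              = PySem.List.pyRange i (i + 1 + u.length + 1) 1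
                ++ remIdx (mkOut (i + 1 + u.length + 1) v) := by
            rw [hmk]; simp [remIdx]
          -- block '{' :: u ++ ['}'] has length u.length + 2 and is fully removed
          have hblock : ∀ x : Int, i ≤ x → x < i + (u.length + 2) → x ∈ Rm := by
            intro x h1 h2
            rw [H x h1, hrem]
            apply List.mem_append_left
            rw [PySem.List.mem_pyRange_one]
            constructor
            · exact h1
            · omega
          have hspec : specOut ('{' :: (u ++ '}' :: v)) = specOut v := by
            rw [specOut, if_pos rfl, specIn_close u v [] hu]
          rw [hspec]
          have hsplit : '{' :: (u ++ '}' :: v) = ('{' :: u ++ ['}']) ++ v := by simp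
          rw [hsplit, filterF_drop ('{' :: u ++ ['}']) v i Rm (by
            intro x h1 h2
            apply hblock x h1
            simp at h2 ⊢
            omega)]
          have hlen : (('{' : Char) :: u ++ ['}']).length = u.length + 2 := by simp
          rw [hlen]
          have := ih v (by simp at hl; omega) (i + (u.length + 2)) Rm (by
            intro x hx
            have h1 : i ≤ x := by omega
            rw [H x h1, hrem]
            simp only [List.mem_append]
            constructor
            · rintro (h2 | h2)
              · rw [PySem.List.mem_pyRange_one] at h2
                exfalso; omega
              · have heq : i + 1 + (u.length : Int) + 1 = i + ((u.length : Int) + 2) := by ring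
                rwa [heq] at h2
            · intro h2
              right
              have heq : i + 1 + (u.length : Int) + 1 = i + ((u.length : Int) + 2) := by ring
              rwa [heq])
          push_cast at this ⊢
          exact this
        · -- no closing brace: everything is kept
          have hmk : mkOut i ('{' :: r) = [] := by
            rw [mkOut, if_pos rfl, mkIn_no_close r i (i+1) hr]
          have : ∀ x : Int, i ≤ x → x ∉ Rm := by
            intro x hx hmem
            have := (H x hx).mp hmem
            rw [hmk] at this
            simp [remIdx] at this
          rw [filterF_keep ('{' :: r) i Rm this]
          rw [specOut, if_pos rfl, specIn_no_close r [] hr]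
          simp
      · -- ordinary character: kept
        have hmk : mkOut i (c :: r) = mkOut (i+1) r := by rw [mkOut, if_neg hc]
        have hni : i ∉ Rm := by
          intro hmem
          have := (H i le_rfl).mp hmem
          rw [hmk] at this
          have := remIdx_lb r.length r le_rfl (i+1) i this
          omega
        rw [filterF, if_neg hni, specOut, if_neg hc]
        congr 1
        exact ih r (by simp at hl; omega) (i+1) Rm (by
          intro x hx
          rw [H x (by omega), hmk])

-- ---- B equals the spec ----
lemma b_fold (l : List Char) : ∀ (out : List Char),
    ((match (l.foldl bStep (out, none)).2 with
      | none => (l.foldl bStep (out, none)).1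
      | some buf => (l.foldl bStep (out, none)).1 ++ '{' :: buf) = out ++ specOut l)
  ∧ (∀ buf, (match (l.foldl bStep (out, some buf)).2 with
      | none => (l.foldl bStep (out, some buf)).1
      | some b2 => (l.foldl bStep (out, some buf)).1 ++ '{' :: b2) = out ++ specIn buf l) := by
  induction l with
  | nil => intro out; constructor
           · simp [specOut]
           · intro buf; simp [specIn]
  | cons c r ih =>
    intro out
    constructor
    · rw [List.foldl_cons]
      by_cases hc : c = '{'
      · have : bStep (out, none) c = (out, some []) := by simp [bStep, hc]
        rw [this]
        rw [(ih out).2 []]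
        simp [specOut, hc]
      · have : bStep (out, none) c = (out ++ [c], none) := by simp [bStep, hc]
        rw [this]
        rw [(ih (out ++ [c])).1]
        simp [specOut, hc]
    · intro buf
      rw [List.foldl_cons]
      by_cases hc : c = '}'
      · have : bStep (out, some buf) c = (out, none) := by simp [bStep, hc]
        rw [this]
        rw [(ih out).1]
        simp [specIn, hc]
      · have : bStep (out, some buf) c = (out, some (buf ++ [c])) := by simp [bStep, hc]
        rw [this]
        rw [(ih out).2 (buf ++ [c])]
        simp [specIn, hc]

lemma alt_eq_spec (s : String) : abbrev_py_alt s = String.ofList (specOut s.toList) := by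
  unfold abbrev_py_alt
  have h := (b_fold s.toList []).1
  simp only [List.nil_append] at h
  cases hmatch : (s.toList.foldl bStep ([], none)).2 with
  | none => simp only [hmatch] at h ⊢; rw [h]
  | some buf => simp only [hmatch] at h ⊢; rw [h]

lemma remove_eq : ∀ (ms : List (Int × Int)) (acc : List Int),
    (ms.map (fun p => [p.1, p.2])).foldl
      (fun acc marker =>
        (PySem.List.pyRange (PySem.List.pyGetD marker 0 0) (PySem.List.pyGetD marker 1 0 + 1) 1).foldl
          (fun acc2 i => acc2 ++ [i]) acc) acc
    = acc ++ remIdx ms := by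
  intro ms
  induction ms with
  | nil => intro acc; simp [remIdx]
  | cons p ms ih =>
    intro acc
    rw [List.map_cons, List.foldl_cons]
    rw [PySem.List.foldl_append_singleton]
    rw [ih]
    have h0 : PySem.List.pyGetD [p.1, p.2] 0 0 = p.1 := by simp [PySem.List.pyGetD]
    have h1 : PySem.List.pyGetD [p.1, p.2] 1 0 = p.2 := by simp [PySem.List.pyGetD]
    rw [h0, h1]
    simp [remIdx]

lemma a_eq_spec (s : String) : abbrev_py s = String.ofList (specOut s.toList) := by
  have h1 := (phase1 s.toList 0 []).1
  rw [List.nil_append] at h1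
  simp only [abbrev_py, h1, remove_eq, List.nil_append, phase3]
  congr 1
  exact main_out s.toList.length s.toList le_rfl 0 (remIdx (mkOut 0 s.toList))
    (fun x _ => Iff.rfl)

-- ===== VERDICT (by name: the statement is the Claim_ definition above) =====
theorem abbrev_py_spec : Claim_equal_abbrev_py := by
  intro s _
  unfold Spec_abbrev_py
  rw [a_eq_spec, alt_eq_spec]
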